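-- pv_equiv track=rewrite | github.com/Efan404/skill-optimization | src/report_generator_track_a.py | _build_dev_root_cause_table
-- ===== SOURCE A (Python) =====
-- TRACK_A_CONDITIONS = [
--     "baseline",
--     "generic_scaffold",
--     "v1_curated",
--     "v1_component_minimal",
--     "v1_component_enriched",
-- ]
--
-- def _build_dev_root_cause_table(dev_analysis: dict) -> str:
--     codes = sorted(
--         {
--             code
--             for condition in TRACK_A_CONDITIONS
--             for item in dev_analysis.get(condition, {}).values()
--             for code in item.get("root_causes", [])
--         }
--     )
--     if not codes:
--         return "### Dev Root Cause Distribution\n\nNo root causes recorded.\n"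
--
--     header = (
--         "### Dev Root Cause Distribution\n\n"
--         "| Root Cause | " + " | ".join(TRACK_A_CONDITIONS) + " |\n"
--         "|-----------|" + "|".join(["----"] * len(TRACK_A_CONDITIONS)) + "|\n"
--     )
--     rows = []
--     for code in codes:
--         counts = []
--         for condition in TRACK_A_CONDITIONS:
--             count = sum(
--                 1
--                 for item in dev_analysis.get(condition, {}).values()
--                 if code in item.get("root_causes", [])
--             )
--             counts.append(str(count) if count else "—")
--         rows.append(f"| {code} | " + " | ".join(counts) + " |")
--     return header + "\n".join(rows) + "\n"
-- ===== SOURCE B (Python) =====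
-- TRACK_A_CONDITIONS = [
--     "baseline",
--     "generic_scaffold",
--     "v1_curated",
--     "v1_component_minimal",
--     "v1_component_enriched",
-- ]
--
-- def _build_dev_root_cause_table(dev_analysis: dict) -> str:
--     # Alternative: one pass per condition builds a code->count dict; cells are dict lookups.
--     per_cond = []
--     for condition in TRACK_A_CONDITIONS:
--         per = {}
--         for item in dev_analysis.get(condition, {}).values():
--             for code in dict.fromkeys(item.get("root_causes", [])):
--                 per[code] = per.get(code, 0) + 1
--         per_cond.append(per)
--     codes = sorted({code for per in per_cond for code in per})
--     if not codes:
--         return "### Dev Root Cause Distribution\n\nNo root causes recorded.\n"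
--     header = (
--         "### Dev Root Cause Distribution\n\n"
--         "| Root Cause | " + " | ".join(TRACK_A_CONDITIONS) + " |\n"
--         "|-----------|" + "|".join(["----"] * len(TRACK_A_CONDITIONS)) + "|\n"
--     )
--     rows = []
--     for code in codes:
--         cells = [str(per[code]) if code in per else "—" for per in per_cond]
--         rows.append("| " + code + " | " + " | ".join(cells) + " |")
--     return header + "\n".join(rows) + "\n"
-- ===== Notes on version B (the rewrite author's own statement) =====
-- stated objective: alternative
-- what changed: A rescans every condition's items once per (code, condition) cell; B makes a single pass per condition building a code->count dict (counting each item once per distinct code) and fills each cell by one dict lookup.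
import Mathlib
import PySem

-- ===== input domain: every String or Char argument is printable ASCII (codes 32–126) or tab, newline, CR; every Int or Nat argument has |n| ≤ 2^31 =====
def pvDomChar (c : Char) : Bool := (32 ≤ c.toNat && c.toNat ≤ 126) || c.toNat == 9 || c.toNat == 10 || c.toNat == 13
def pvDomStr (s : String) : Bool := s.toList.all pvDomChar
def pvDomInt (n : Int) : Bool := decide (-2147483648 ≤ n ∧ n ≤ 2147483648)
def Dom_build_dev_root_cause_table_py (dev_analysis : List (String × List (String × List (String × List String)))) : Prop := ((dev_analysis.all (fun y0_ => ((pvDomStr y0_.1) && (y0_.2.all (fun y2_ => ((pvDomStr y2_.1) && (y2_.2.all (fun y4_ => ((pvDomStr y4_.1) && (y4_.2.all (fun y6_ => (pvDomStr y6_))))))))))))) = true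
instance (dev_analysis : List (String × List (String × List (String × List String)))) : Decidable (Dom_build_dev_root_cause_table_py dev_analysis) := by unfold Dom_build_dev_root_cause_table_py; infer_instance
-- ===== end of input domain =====

-- B replaces A's per-(code,condition) rescans of all items by one pass per condition that builds a
-- code->count dict, then fills each cell by lookup; objective: alternative algorithm, same measured cost.

-- ===== PORT A =====
def pvConds : List String :=
  ["baseline", "generic_scaffold", "v1_curated", "v1_component_minimal", "v1_component_enriched"]

-- dev_analysis.get(condition, {}).values()
def pvVals (dev : List (String × List (String × List (String × List String)))) (c : String) :
    List (List (String × List String)) :=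
  (PySem.Dict.ofList ((PySem.Dict.ofList dev).getD c [])).values

-- item.get("root_causes", [])
def pvRC (item : List (String × List String)) : List String :=
  (PySem.Dict.ofList item).getD "root_causes" []

def build_dev_root_cause_table_py (dev_analysis : List (String × List (String × List (String × List String)))) : String :=
  let codes := PySem.List.sorted
    (PySem.Set.ofList (pvConds.flatMap (fun condition =>
      (pvVals dev_analysis condition).flatMap (fun item => pvRC item))))
    (fun x => x) false
  if codes = [] then "### Dev Root Cause Distribution\n\nNo root causes recorded.\n"
  else
    let header := "### Dev Root Cause Distribution\n\n| Root Cause | "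
      ++ PySem.Str.join " | " pvConds ++ " |\n|-----------|"
      ++ PySem.Str.join "|" (List.replicate pvConds.length "----") ++ "|\n"
    let rows := codes.map (fun code =>
      let counts := pvConds.map (fun condition =>
        let count : Int := (((pvVals dev_analysis condition).filter
          (fun item => decide (code ∈ pvRC item))).length : Int)
        if count ≠ 0 then PySem.Int.toStr count else "—")
      "| " ++ code ++ " | " ++ PySem.Str.join " | " counts ++ " |")
    header ++ PySem.Str.join "\n" rows ++ "\n"

-- ===== PORT B =====
-- per-condition pass: per[code] = per.get(code, 0) + 1 for each distinct code of each item
def pvPer (dev : List (String × List (String × List (String × List String)))) (c : String) :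
    PySem.Dict String Int :=
  (pvVals dev c).foldl
    (fun per item =>
      (PySem.List.dedup (pvRC item)).foldl
        (fun per code => per.insert code (per.getD code 0 + 1)) per)
    PySem.Dict.empty

def build_dev_root_cause_table_py_alt (dev_analysis : List (String × List (String × List (String × List String)))) : String :=
  let perCond := pvConds.map (fun condition => pvPer dev_analysis condition)
  let codes := PySem.List.sorted
    (PySem.Set.ofList (perCond.flatMap (fun per => per.keys)))
    (fun x => x) false
  if codes = [] then "### Dev Root Cause Distribution\n\nNo root causes recorded.\n"
  else
    let header := "### Dev Root Cause Distribution\n\n| Root Cause | "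
      ++ PySem.Str.join " | " pvConds ++ " |\n|-----------|"
      ++ PySem.Str.join "|" (List.replicate pvConds.length "----") ++ "|\n"
    let rows := codes.map (fun code =>
      let cells := perCond.map (fun per =>
        if per.contains code then PySem.Int.toStr (per.getD code 0) else "—")
      "| " ++ code ++ " | " ++ PySem.Str.join " | " cells ++ " |")
    header ++ PySem.Str.join "\n" rows ++ "\n"

-- ===== PRECONDITION & SPEC =====
def Spec_build_dev_root_cause_table_py (dev_analysis : List (String × List (String × List (String × List String)))) (out : String) : Prop := out = build_dev_root_cause_table_py_alt dev_analysis
instance (dev_analysis : List (String × List (String × List (String × List String)))) (out : String) : Decidable (Spec_build_dev_root_cause_table_py dev_analysis out) := by unfold Spec_build_dev_root_cause_table_py; infer_instance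

-- ===== CLAIM (what is proved, stated in full; the proofs are below) =====
def Claim_equal_build_dev_root_cause_table_py : Prop := ∀ (dev_analysis : List (String × List (String × List (String × List String)))), Dom_build_dev_root_cause_table_py dev_analysis → Spec_build_dev_root_cause_table_py dev_analysis (build_dev_root_cause_table_py dev_analysis)

-- ===== LEMMAS AND PROOFS =====

theorem pvPer_eq_counter (dev : List (String × List (String × List (String × List String)))) (c : String) :
    pvPer dev c = PySem.Dict.counter ((pvVals dev c).flatMap (fun item => PySem.List.dedup (pvRC item))) := by
  unfold pvPer
  rw [← PySem.Dict.foldl_insert_getD_add_one_eq_counter, List.foldl_flatMap]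

theorem pvCount_flat (code : String) (vals : List (List (String × List String))) :
    (vals.flatMap (fun item => PySem.List.dedup (pvRC item))).count code
      = (vals.filter (fun item => decide (code ∈ pvRC item))).length := by
  induction vals with
  | nil => simp
  | cons v t ih =>
    simp only [List.flatMap_cons, List.count_append, List.filter_cons]
    by_cases h : code ∈ pvRC v
    · rw [List.count_eq_one_of_mem (PySem.List.nodup_dedup _) ((PySem.List.mem_dedup _ _).mpr h), ih]
      simp [h, Nat.add_comm]
    · rw [List.count_eq_zero.mpr (fun hm => h ((PySem.List.mem_dedup _ _).mp hm)), ih]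
      simp [h]

-- A's per-(code, condition) rescan count equals B's counter-dict cell
theorem pvCell_eq (dev : List (String × List (String × List (String × List String)))) (code c : String) :
    (if (((pvVals dev c).filter (fun item => decide (code ∈ pvRC item))).length : Int) ≠ 0
       then PySem.Int.toStr (((pvVals dev c).filter (fun item => decide (code ∈ pvRC item))).length : Int)
       else "—")
    = (if (pvPer dev c).contains code then PySem.Int.toStr ((pvPer dev c).getD code 0) else "—") := by
  rw [pvPer_eq_counter, PySem.Dict.contains_counter, PySem.Dict.getD_counter, pvCount_flat]
  by_cases h : code ∈ (pvVals dev c).flatMap (fun item => PySem.List.dedup (pvRC item))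
  · have hc : ((pvVals dev c).flatMap (fun item => PySem.List.dedup (pvRC item))).contains code = true := by
      simpa using h
    have hn : ((pvVals dev c).filter (fun item => decide (code ∈ pvRC item))).length ≠ 0 := by
      rw [← pvCount_flat]; exact fun h0 => List.count_eq_zero.mp h0 h
    rw [if_pos (by exact_mod_cast hn), if_pos hc]
  · have hc : ((pvVals dev c).flatMap (fun item => PySem.List.dedup (pvRC item))).contains code = false := by
      simpa using h
    have hn : ((pvVals dev c).filter (fun item => decide (code ∈ pvRC item))).length = 0 := by
      rw [← pvCount_flat]; exact List.count_eq_zero.mpr h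
    rw [hn, if_neg (by simp), if_neg (by simp only [hc, Bool.false_eq_true, not_false_eq_true])]

-- A's sorted set of codes (from root-cause lists) equals B's (from the counter keys)
theorem pvCodes_eq (dev : List (String × List (String × List (String × List String)))) :
    PySem.List.sorted (PySem.Set.ofList (pvConds.flatMap (fun condition =>
        (pvVals dev condition).flatMap (fun item => pvRC item)))) (fun x => x) false
    = PySem.List.sorted (PySem.Set.ofList ((pvConds.map (fun condition => pvPer dev condition)).flatMap
        (fun per => per.keys))) (fun x => x) false := by
  refine PySem.List.sorted_eq_sorted_of_perm _ _ _ (fun a b hh => hh) ?_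
  refine (List.perm_ext_iff_of_nodup (PySem.Set.nodup_ofList _) (PySem.Set.nodup_ofList _)).mpr ?_
  intro a
  simp only [PySem.Set.mem_ofList, List.mem_flatMap, List.mem_map]
  constructor
  · rintro ⟨c, hc, item, hi, ha⟩
    exact ⟨pvPer dev c, ⟨c, hc, rfl⟩, by
      rw [pvPer_eq_counter, PySem.Dict.keys_counter]
      simp only [PySem.Set.mem_ofList, List.mem_flatMap]
      exact ⟨item, hi, (PySem.List.mem_dedup _ _).mpr ha⟩⟩
  · rintro ⟨per, ⟨c, hc, rfl⟩, ha⟩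
    rw [pvPer_eq_counter, PySem.Dict.keys_counter] at ha
    simp only [PySem.Set.mem_ofList, List.mem_flatMap] at ha
    obtain ⟨item, hi, ha⟩ := ha
    exact ⟨c, hc, item, hi, (PySem.List.mem_dedup _ _).mp ha⟩

theorem pvMain (dev : List (String × List (String × List (String × List String)))) :
    build_dev_root_cause_table_py dev = build_dev_root_cause_table_py_alt dev := by
  unfold build_dev_root_cause_table_py build_dev_root_cause_table_py_alt
  rw [pvCodes_eq dev]
  have hrow : ∀ code : String,
      (pvConds.map (fun condition =>
        if (((pvVals dev condition).filter (fun item => decide (code ∈ pvRC item))).length : Int) ≠ 0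
        then PySem.Int.toStr (((pvVals dev condition).filter (fun item => decide (code ∈ pvRC item))).length : Int)
        else "—"))
      = (pvConds.map (fun condition => pvPer dev condition)).map (fun per =>
          if per.contains code then PySem.Int.toStr (per.getD code 0) else "—") := by
    intro code
    rw [List.map_map]
    exact List.map_congr_left (fun c _ => pvCell_eq dev code c)
  simp only [hrow]

-- ===== VERDICT (by name: the statement is the Claim_ definition above) =====
theorem build_dev_root_cause_table_py_spec : Claim_equal_build_dev_root_cause_table_py := by
  intro dev _
  exact pvMain dev
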